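-- pv_equiv track=rewrite | github.com/pypi-data/pypi-mirror-404 | packages/mahlif/mahlif-0.1.0.tar.gz/mahlif-0.1.0/src/mahlif/sibelius/manuscript/format.py | _find_unescaped_quote
-- ===== SOURCE A (Python) =====
-- def _find_unescaped_quote(s: str) -> int:
--     """Find first unescaped double quote in string.
--
--     Args:
--         s: String to search
--
--     Returns:
--         Index of quote, or -1 if not found
--     """
--     i = 0
--     while i < len(s):
--         if s[i] == "\\":
--             i += 2  # Skip escape sequence
--         elif s[i] == '"':
--             return i
--         else:
--             i += 1
--     return -1
-- ===== SOURCE B (Python) =====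
-- def _find_unescaped_quote(s: str) -> int:
--     """Find first unescaped double quote: collect quote positions, then keep the
--     first whose preceding run of backslashes has even length."""
--     positions = [i for i, c in enumerate(s) if c == '"']
--     for j in positions:
--         k = j
--         while k and s[k - 1] == "\\":
--             k -= 1
--         if (j - k) % 2 == 0:
--             return j
--     return -1
-- ===== Notes on version B (the rewrite author's own statement) =====
-- stated objective: alternative
-- what changed: Replaces A's single index-jumping scan (i += 2 over escape sequences) by a staged algorithm: first collect all double-quote positions via an enumerate comprehension, then return the first position whose immediately preceding run of backslashes has even length (counted by a backward walk).
import Mathlib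
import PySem

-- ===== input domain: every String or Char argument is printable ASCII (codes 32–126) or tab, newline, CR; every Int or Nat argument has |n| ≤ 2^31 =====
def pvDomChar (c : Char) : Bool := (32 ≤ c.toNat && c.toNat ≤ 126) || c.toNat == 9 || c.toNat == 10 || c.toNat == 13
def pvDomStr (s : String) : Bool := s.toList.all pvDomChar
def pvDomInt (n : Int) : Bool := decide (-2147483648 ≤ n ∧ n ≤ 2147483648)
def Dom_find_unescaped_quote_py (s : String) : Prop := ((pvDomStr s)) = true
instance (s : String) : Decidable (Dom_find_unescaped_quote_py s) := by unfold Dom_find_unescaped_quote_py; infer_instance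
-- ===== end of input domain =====

-- B replaces A's single skip-by-two scan by a staged algorithm: first collect all
-- double-quote positions, then return the first whose preceding backslash run has
-- even length (objective: alternative decomposition, same asymptotic cost).

-- ===== PORT A =====
-- A's while-loop: i advances by 2 past a backslash (skipping the escaped char),
-- returns i at an unescaped '"', else advances by 1. Modelled as recursion on the
-- remaining character list with the current index i.
def fuqLoopA : List Char → Nat → Int
  | [], _ => -1
  | c :: rest, i =>
    if c = '\\' then fuqLoopA (rest.drop 1) (i + 2)
    else if c = '"' then (i : Int)
    else fuqLoopA rest (i + 1)
  termination_by l => l.length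
  decreasing_by all_goals simp

def find_unescaped_quote_py (s : String) : Int := fuqLoopA s.toList 0

-- ===== PORT B =====
-- B's inner while-loop: k walks left over backslashes (k = run start before j).
def fuqRunStart (l : List Char) : Nat → Nat
  | 0 => 0
  | k + 1 => if l[k]? = some '\\' then fuqRunStart l k else k + 1

-- B's for-loop over the collected quote positions.
def fuqScan (l : List Char) : List Int → Int
  | [] => -1
  | j :: rest =>
    if (j.toNat - fuqRunStart l j.toNat) % 2 = 0 then j else fuqScan l rest

-- positions = [i for i, c in enumerate(s) if c == '"']
def find_unescaped_quote_py_alt (s : String) : Int :=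
  fuqScan s.toList
    ((PySem.List.enumerate s.toList).filterMap
      (fun p => if p.2 = '"' then some p.1 else none))

-- ===== PRECONDITION & SPEC =====
def Spec_find_unescaped_quote_py (s : String) (out : Int) : Prop := out = find_unescaped_quote_py_alt s
instance (s : String) (out : Int) : Decidable (Spec_find_unescaped_quote_py s out) := by unfold Spec_find_unescaped_quote_py; infer_instance

-- ===== CLAIM (what is proved, stated in full; the proofs are below) =====
def Claim_equal_find_unescaped_quote_py : Prop := ∀ (s : String), Dom_find_unescaped_quote_py s → Spec_find_unescaped_quote_py s (find_unescaped_quote_py s)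

-- ===== LEMMAS AND PROOFS =====

-- quote positions of the suffix l.drop i, with absolute indices (proof-side helper)
def fuqQs (l : List Char) (i : Nat) : List Int :=
  (PySem.List.enumerate (l.drop i) (i : Int)).filterMap
    (fun p => if p.2 = '"' then some p.1 else none)

theorem fuqRunStart_le (l : List Char) : ∀ k, fuqRunStart l k ≤ k := by
  intro k
  induction k with
  | zero => simp [fuqRunStart]
  | succ n ih => simp only [fuqRunStart]; split <;> omega

theorem fuqQs_nil (l : List Char) (i : Nat) (h : l.drop i = []) : fuqQs l i = [] := by
  simp [fuqQs, h, PySem.List.enumerate_nil]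

theorem fuqQs_cons (l : List Char) (i : Nat) (hi : i < l.length) :
    fuqQs l i = (if l[i] = '"' then [(i : Int)] else []) ++ fuqQs l (i + 1) := by
  have hd : l.drop i = l[i] :: l.drop (i + 1) := List.drop_eq_getElem_cons hi
  simp only [fuqQs, hd, PySem.List.enumerate_cons, List.filterMap_cons]
  by_cases hq : l[i] = '"' <;> simp [hq]

-- Main invariant: if the scan stands (unescaped) at position i — equivalently the
-- backslash run ending just before i has even length — then A's loop from i equals
-- B's scan over the quote positions of the suffix.
theorem fuq_main (l : List Char) : ∀ n i, l.length - i ≤ n →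
    (i - fuqRunStart l i) % 2 = 0 →
    fuqLoopA (l.drop i) i = fuqScan l (fuqQs l i) := by
  intro n
  induction n with
  | zero =>
    intro i hn _
    have h : l.drop i = [] := List.drop_eq_nil_of_le (by omega)
    simp [h, fuqQs_nil l i h, fuqLoopA, fuqScan]
  | succ n ih =>
    intro i hn hpar
    by_cases hi : i < l.length
    · have hd : l.drop i = l[i] :: l.drop (i + 1) := List.drop_eq_getElem_cons hi
      have hget : l[i]? = some l[i] := List.getElem?_eq_getElem hi
      by_cases hb : l[i] = '\\'
      · -- backslash: A skips two; the char at i+1 (if any) is skipped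
        have hA : fuqLoopA (l.drop i) i = fuqLoopA (l.drop (i + 2)) (i + 2) := by
          rw [hd]
          simp only [fuqLoopA, hb, if_pos, List.drop_drop]
        rw [hA, fuqQs_cons l i hi, if_neg (by rw [hb]; decide)]
        simp only [List.nil_append]
        by_cases hi1 : i + 1 < l.length
        · have hget1 : l[i + 1]? = some l[i + 1] := List.getElem?_eq_getElem hi1
          by_cases hq1 : l[i + 1] = '"'
          · -- escaped quote at i+1: B's parity test rejects it
            rw [fuqQs_cons l (i + 1) hi1, if_pos hq1]
            have hrs : fuqRunStart l (i + 1) = fuqRunStart l i := by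
              simp [fuqRunStart, hget, hb]

            have hle := fuqRunStart_le l i
            simp only [List.singleton_append, fuqScan, Int.toNat_natCast]
            rw [if_neg (by rw [hrs]; omega)]
            have hrs2 : fuqRunStart l (i + 2) = i + 2 := by
              show fuqRunStart l ((i + 1) + 1) = i + 2
              simp [fuqRunStart, hget1, hq1]
            exact ih (i + 2) (by omega) (by rw [hrs2]; omega)
          · -- non-quote at i+1: drop it from the position list too
            rw [fuqQs_cons l (i + 1) hi1, if_neg hq1]
            simp only [List.nil_append]
            by_cases hb1 : l[i + 1] = '\\'
            · have hrs : fuqRunStart l (i + 2) = fuqRunStart l i := by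
                show fuqRunStart l ((i + 1) + 1) = _
                simp [fuqRunStart, hget1, hb1, hget, hb]
              have hle := fuqRunStart_le l i
              exact ih (i + 2) (by omega) (by rw [hrs]; omega)
            · have hrs : fuqRunStart l (i + 2) = i + 2 := by
                show fuqRunStart l ((i + 1) + 1) = i + 2
                simp [fuqRunStart, hget1, hb1]
              exact ih (i + 2) (by omega) (by rw [hrs]; omega)
        · -- i+1 is past the end: both sides are empty/-1
          have h2 : l.drop (i + 2) = [] := List.drop_eq_nil_of_le (by omega)
          have h1 : l.drop (i + 1) = [] := List.drop_eq_nil_of_le (by omega)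
          rw [h2, fuqQs_nil l (i + 1) h1]
          simp [fuqLoopA, fuqScan]
      · by_cases hq : l[i] = '"'
        · -- unescaped quote at i: both return i
          rw [hd, fuqQs_cons l i hi, if_pos hq]
          simp only [fuqLoopA, hq, if_true, List.singleton_append,
            fuqScan, Int.toNat_natCast, if_pos hpar]
          simp
        · -- ordinary char: advance one
          rw [hd, fuqQs_cons l i hi, if_neg hq]
          simp only [fuqLoopA, hb, hq, if_false, List.nil_append]
          have hrs : fuqRunStart l (i + 1) = i + 1 := by
            simp [fuqRunStart, hget, hb]
          simpa [hb, hq] using ih (i + 1) (by omega) (by rw [hrs]; omega)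
    · have h : l.drop i = [] := List.drop_eq_nil_of_le (by omega)
      simp [h, fuqQs_nil l i h, fuqLoopA, fuqScan]

theorem fuqQs_zero (l : List Char) :
    fuqQs l 0 = (PySem.List.enumerate l).filterMap
      (fun p => if p.2 = '"' then some p.1 else none) := by
  simp [fuqQs]

-- ===== VERDICT (by name: the statement is the Claim_ definition above) =====
theorem find_unescaped_quote_py_spec : Claim_equal_find_unescaped_quote_py := by
  intro s _
  unfold Spec_find_unescaped_quote_py find_unescaped_quote_py find_unescaped_quote_py_alt
  rw [← fuqQs_zero]
  simpa using fuq_main s.toList s.toList.length 0 (by omega) (by simp [fuqRunStart])
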